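-- pv_equiv track=rewrite | github.com/seantdinh/ProjectWorkExamples | GlassDoorInterviewQuestions/replacingnonelastcharacter.py | replacingnulls
-- ===== SOURCE A (Python) =====
-- def replacingnulls(list):
--     ## replacing nulls with pervious value
--     previousNumber = 0
--     answer = []
--
--     for i in list:
--         if i is not None:
--             answer.append(i)
--             previousNumber = i
--         else:
--             answer.append(previousNumber)
--
--     for count, i in enumerate(answer):
--         if i == 0:
--             answer[count] = None
--
--     return answer
-- ===== SOURCE B (Python) =====
-- def replacingnulls(list):
--     # Run-length / segment algorithm: each carrier value (the initial seed 0,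
--     # or a non-None entry) covers itself plus the run of Nones that follows it;
--     # that whole segment is emitted at once as a replicated block (with the
--     # zero -> None rendering applied to the block's value), then we jump past it.
--     out = []
--     prev = 0
--     i = 0
--     n = len(list)
--     while i < n:
--         v = prev if list[i] is None else list[i]
--         j = i + 1
--         while j < n and list[j] is None:
--             j += 1
--         out += [None if v == 0 else v] * (j - i)
--         prev = v
--         i = j
--     return out
-- ===== Notes on version B (the rewrite author's own statement) =====
-- stated objective: alternative
-- what changed: Replaces A's element-by-element forward-fill plus a second zero-to-None mutation pass with a run-length segment algorithm: an outer loop jumps from carrier to carrier, an inner scan measures each run of Nones, and the whole segment is emitted at once as a replicated block of the rendered value.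
import Mathlib
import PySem

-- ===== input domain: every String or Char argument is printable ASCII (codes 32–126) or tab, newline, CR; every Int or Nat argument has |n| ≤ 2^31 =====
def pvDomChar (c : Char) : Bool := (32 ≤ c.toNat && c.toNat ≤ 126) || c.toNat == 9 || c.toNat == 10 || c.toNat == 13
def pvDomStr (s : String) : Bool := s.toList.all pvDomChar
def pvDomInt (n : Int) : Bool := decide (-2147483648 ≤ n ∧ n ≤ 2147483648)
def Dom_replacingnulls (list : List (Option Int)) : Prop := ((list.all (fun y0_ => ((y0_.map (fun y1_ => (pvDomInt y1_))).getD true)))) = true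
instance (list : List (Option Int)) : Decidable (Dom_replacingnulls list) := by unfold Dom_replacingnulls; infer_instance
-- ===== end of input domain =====

-- B replaces A's element-wise forward-fill + second zero→None pass with a run-length segment algorithm (jump from carrier to carrier, emit each segment as a replicated block); objective: alternative.


-- ===== PORT A =====
-- first loop: fold carrying (answer, previousNumber); second loop: enumerate-and-mutate = map over answer (entries are all `some`)
def replacingnulls (list : List (Option Int)) : List (Option Int) :=
  let st := list.foldl
    (fun (st : List (Option Int) × Int) i =>
      match i with
      | some v => (st.1 ++ [some v], v)
      | none   => (st.1 ++ [some st.2], st.2))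
    ([], 0)
  st.1.map (fun i => if i = some 0 then none else i)

-- ===== PORT B =====
-- outer while-loop over segments becomes recursion on the remaining list; the inner
-- run-measuring while-loop is the length of the leading None run (takeWhile)
def replacingnulls_fillSeg (xs : List (Option Int)) (prev : Int) : List (Option Int) :=
  match xs with
  | [] => []
  | x :: rest =>
    let v := match x with | none => prev | some w => w
    let k := (rest.takeWhile (fun y => y.isNone)).length
    List.replicate (k + 1) (if v = 0 then none else some v) ++
      replacingnulls_fillSeg (rest.drop k) v
termination_by xs.length
decreasing_by
  simp only [List.length_drop, List.length_cons]
  omega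

def replacingnulls_alt (list : List (Option Int)) : List (Option Int) :=
  replacingnulls_fillSeg list 0

-- ===== PRECONDITION & SPEC =====
def Spec_replacingnulls (list : List (Option Int)) (out : List (Option Int)) : Prop := out = replacingnulls_alt list
instance (list : List (Option Int)) (out : List (Option Int)) : Decidable (Spec_replacingnulls list out) := by unfold Spec_replacingnulls; infer_instance

-- ===== CLAIM (what is proved, stated in full; the proofs are below) =====
def Claim_equal_replacingnulls : Prop := ∀ (list : List (Option Int)), Dom_replacingnulls list → Spec_replacingnulls list (replacingnulls list)

-- ===== LEMMAS AND PROOFS =====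
-- elementwise forward-fill (the invariant shape of A's first loop)
def pvFfill : List (Option Int) → Int → List (Option Int)
  | [], _ => []
  | none :: r, p => some p :: pvFfill r p
  | some v :: r, _ => some v :: pvFfill r v

theorem replacingnulls_foldA (xs : List (Option Int)) (acc : List (Option Int)) (prev : Int) :
    (xs.foldl
      (fun (st : List (Option Int) × Int) i =>
        match i with
        | some v => (st.1 ++ [some v], v)
        | none   => (st.1 ++ [some st.2], st.2))
      (acc, prev)).1 = acc ++ pvFfill xs prev := by
  induction xs generalizing acc prev with
  | nil => simp [pvFfill]
  | cons x rest ih =>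
    cases x with
    | some v => simp [pvFfill, ih (acc ++ [some v]) v]
    | none => simp [pvFfill, ih (acc ++ [some prev]) prev]

theorem pvFfill_none_run (run : List (Option Int)) (ys : List (Option Int)) (p : Int)
    (h : ∀ y ∈ run, y = none) :
    pvFfill (run ++ ys) p = List.replicate run.length (some p) ++ pvFfill ys p := by
  induction run with
  | nil => simp
  | cons r t ih =>
    have hr : r = none := h r (by simp)
    subst hr
    simp [pvFfill, List.replicate_succ, ih (fun y hy => h y (by simp [hy]))]

theorem pv_drop_takeWhile {α : Type} (p : α → Bool) (l : List α) :
    l.drop (l.takeWhile p).length = l.dropWhile p := by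
  induction l with
  | nil => rfl
  | cons x t ih =>
    by_cases hx : p x = true <;> simp [List.takeWhile, List.dropWhile, hx, ih]

theorem replacingnulls_fillSeg_eq (n : Nat) :
    ∀ (xs : List (Option Int)) (prev : Int), xs.length ≤ n →
      replacingnulls_fillSeg xs prev
        = (pvFfill xs prev).map (fun i => if i = some 0 then none else i) := by
  induction n with
  | zero =>
    intro xs prev h
    have : xs = [] := List.eq_nil_of_length_eq_zero (Nat.le_zero.mp h)
    subst this
    simp [replacingnulls_fillSeg, pvFfill]
  | succ n ih =>
    intro xs prev h
    match xs with
    | [] => simp [replacingnulls_fillSeg, pvFfill]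
    | x :: rest =>
      set run := rest.takeWhile (fun y => y.isNone) with hrun
      have hsplit : run ++ rest.drop run.length = rest := by
        rw [hrun, pv_drop_takeWhile, List.takeWhile_append_dropWhile]
      have hmem : ∀ y ∈ run, y = none := by
        intro y hy
        have := List.mem_takeWhile_imp (hrun ▸ hy)
        exact Option.isNone_iff_eq_none.mp this
      have hlen : (rest.drop run.length).length ≤ n := by
        have := List.length_drop (l := rest) (i := run.length)
        simp at h
        omega
      cases x with
      | none =>
        simp only [replacingnulls_fillSeg]
        rw [← hrun]
        simp only [ih (rest.drop run.length) prev hlen]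
        conv_rhs => rw [show pvFfill (none :: rest) prev = some prev :: pvFfill rest prev from rfl]
        conv_rhs => rw [← hsplit, pvFfill_none_run run _ prev hmem]
        simp [List.replicate_succ, List.map_replicate]
      | some w =>
        simp only [replacingnulls_fillSeg]
        rw [← hrun]
        simp only [ih (rest.drop run.length) w hlen]
        conv_rhs => rw [show pvFfill (some w :: rest) prev = some w :: pvFfill rest w from rfl]
        conv_rhs => rw [← hsplit, pvFfill_none_run run _ w hmem]
        simp [List.replicate_succ, List.map_replicate]

-- ===== VERDICT (by name: the statement is the Claim_ definition above) =====
theorem replacingnulls_spec : Claim_equal_replacingnulls := by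
  intro list _
  show _ = _
  rw [replacingnulls_alt, replacingnulls_fillSeg_eq list.length list 0 le_rfl,
    replacingnulls]
  simp [replacingnulls_foldA]
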